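-- pv_equiv track=rewrite | github.com/miliar/Code_Jam_Webscraper | solutions_python/Problem_201/1076.py | task3
-- ===== SOURCE A (Python) =====
-- def task3(n,k):
-- 	n = int(n)
-- 	k = int(k)
-- 	if (k==1):
-- 		return task3_helper(n)
-- 	if (k%2):
-- 		if (n%2):
-- 			return task3(n//2, k//2)
-- 		return task3(n//2 - 1, k//2) # the left part is n//2 -1
-- 	# the last one goes the the right part
-- 	if (n%2): #
-- 		return task3(n//2, k//2)
-- 	return task3(n//2, k//2)
--
-- def task3_helper(n):
-- 	if (n%2):
-- 		return [n//2,n//2]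
-- 	else :
-- 		return [n//2 , n//2 - 1]
-- ===== SOURCE B (Python) =====
-- def task3(n, k):
--     n = int(n)
--     k = int(k)
--     while k != 1:
--         if k % 2 == 1 and n % 2 == 0:
--             n = n // 2 - 1
--         else:
--             n = n // 2
--         k //= 2
--     if n % 2:
--         return [n // 2, n // 2]
--     return [n // 2, n // 2 - 1]
-- ===== Notes on version B (the rewrite author's own statement) =====
-- stated objective: simpler
-- what changed: Replaced the tail recursion with helper function and a redundant four-way branch tree by a single iterative while-loop with one combined condition (k%2==1 and n%2==0) and the base case inlined.
import Mathlib
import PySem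

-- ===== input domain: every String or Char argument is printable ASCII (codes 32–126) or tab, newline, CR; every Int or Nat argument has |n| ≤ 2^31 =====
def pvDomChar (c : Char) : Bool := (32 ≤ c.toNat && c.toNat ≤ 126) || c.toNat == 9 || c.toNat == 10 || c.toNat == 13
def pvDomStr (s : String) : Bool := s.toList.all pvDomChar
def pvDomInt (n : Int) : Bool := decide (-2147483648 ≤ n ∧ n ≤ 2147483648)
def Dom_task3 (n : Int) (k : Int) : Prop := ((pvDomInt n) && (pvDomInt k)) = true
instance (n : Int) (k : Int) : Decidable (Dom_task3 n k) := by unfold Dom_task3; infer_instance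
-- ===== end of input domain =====

-- B replaces A's tail recursion + helper and redundant branch tree by one while-loop
-- with a single combined condition and the base case inlined (objective: simpler).

-- ===== PORT A =====
def task3_helperL (n : Int) : List Int :=
  if PySem.Int.mod n 2 ≠ 0 then [PySem.Int.floordiv n 2, PySem.Int.floordiv n 2]
  else [PySem.Int.floordiv n 2, PySem.Int.floordiv n 2 - 1]

def task3 (n : Int) (k : Int) : List Int :=
  if k = 1 then task3_helperL n
  else if _h : k ≤ 0 then []  -- totality guard: Python recurses forever (RecursionError) here; excluded by Pre_task3
  else if PySem.Int.mod k 2 ≠ 0 then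
    if PySem.Int.mod n 2 ≠ 0 then task3 (PySem.Int.floordiv n 2) (PySem.Int.floordiv k 2)
    else task3 (PySem.Int.floordiv n 2 - 1) (PySem.Int.floordiv k 2)
  else if PySem.Int.mod n 2 ≠ 0 then task3 (PySem.Int.floordiv n 2) (PySem.Int.floordiv k 2)
  else task3 (PySem.Int.floordiv n 2) (PySem.Int.floordiv k 2)
termination_by k.toNat
decreasing_by
  all_goals
    have h2 : PySem.Int.floordiv k 2 = k / 2 := PySem.Int.floordiv_eq_ediv_of_pos (by omega)
    omega

-- ===== PORT B =====
-- the while-loop of Source B: returns the final value of n when the loop exits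
def task3AltLoop (n : Int) (k : Int) : Int :=
  if _h : 1 < k then
    task3AltLoop
      (if PySem.Int.mod k 2 = 1 ∧ PySem.Int.mod n 2 = 0 then PySem.Int.floordiv n 2 - 1
       else PySem.Int.floordiv n 2)
      (PySem.Int.floordiv k 2)
  else n  -- k = 1 exits the while; for k ≤ 0 Python loops forever (excluded by Pre_task3): totality guard
termination_by k.toNat
decreasing_by
  have h2 : PySem.Int.floordiv k 2 = k / 2 := PySem.Int.floordiv_eq_ediv_of_pos (by omega)
  omega

def task3_alt (n : Int) (k : Int) : List Int :=
  let m := task3AltLoop n k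
  if PySem.Int.mod m 2 ≠ 0 then [PySem.Int.floordiv m 2, PySem.Int.floordiv m 2]
  else [PySem.Int.floordiv m 2, PySem.Int.floordiv m 2 - 1]

-- ===== PRECONDITION & SPEC =====
-- Pre_ excludes k ≤ 0: there A recurses forever (RecursionError) and B's while-loop never exits.
def Pre_task3 (n : Int) (k : Int) : Prop := 1 ≤ k
instance (n : Int) (k : Int) : Decidable (Pre_task3 n k) := by unfold Pre_task3; infer_instance
def pvWitness_task3 : Int × Int := (10, 4)

def Spec_task3 (n : Int) (k : Int) (out : List Int) : Prop := out = task3_alt n k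
instance (n : Int) (k : Int) (out : List Int) : Decidable (Spec_task3 n k out) := by unfold Spec_task3; infer_instance

-- ===== CLAIM (what is proved, stated in full; the proofs are below) =====
def Claim_equal_task3 : Prop := ∀ (n : Int) (k : Int), Dom_task3 n k → Pre_task3 n k → Spec_task3 n k (task3 n k)

-- ===== LEMMAS AND PROOFS =====

-- one unfolding of B's loop for 1 < k
theorem task3AltLoop_step (n k : Int) (h : 1 < k) :
    task3AltLoop n k =
      task3AltLoop
        (if PySem.Int.mod k 2 = 1 ∧ PySem.Int.mod n 2 = 0 then PySem.Int.floordiv n 2 - 1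
         else PySem.Int.floordiv n 2)
        (PySem.Int.floordiv k 2) := by
  rw [task3AltLoop]
  simp [h]

theorem task3AltLoop_one (n : Int) : task3AltLoop n 1 = n := by
  rw [task3AltLoop]; simp

theorem task3_alt_step (n k : Int) (h : 1 < k) :
    task3_alt n k =
      task3_alt
        (if PySem.Int.mod k 2 = 1 ∧ PySem.Int.mod n 2 = 0 then PySem.Int.floordiv n 2 - 1
         else PySem.Int.floordiv n 2)
        (PySem.Int.floordiv k 2) := by
  unfold task3_alt
  rw [task3AltLoop_step n k h]

theorem task3_alt_one (n : Int) : task3_alt n 1 = task3_helperL n := by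
  unfold task3_alt task3_helperL
  rw [task3AltLoop_one]

theorem task3_eq_alt : ∀ (m : Nat) (n k : Int), k.toNat = m → 1 ≤ k → task3 n k = task3_alt n k := by
  intro m
  induction m using Nat.strong_induction_on with
  | _ m ih =>
    intro n k hm hk
    by_cases h1 : k = 1
    · subst h1
      rw [task3, task3_alt_one]
      simp
    · have h2 : 1 < k := by omega
      have hfd : PySem.Int.floordiv k 2 = k / 2 := PySem.Int.floordiv_eq_ediv_of_pos (by omega)
      have hmodk : PySem.Int.mod k 2 = k % 2 := PySem.Int.mod_eq_emod_of_pos (by omega)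
      have hmodn : PySem.Int.mod n 2 = n % 2 := PySem.Int.mod_eq_emod_of_pos (by omega)
      have hk' : 1 ≤ PySem.Int.floordiv k 2 := by omega
      have hlt : (PySem.Int.floordiv k 2).toNat < m := by omega
      have hnle : ¬ k ≤ 0 := by omega
      rw [task3, task3_alt_step n k h2]
      simp only [if_neg h1, dif_neg hnle]
      by_cases hkz : PySem.Int.mod k 2 = 0
      · rw [if_neg (by omega : ¬ PySem.Int.mod k 2 ≠ 0), ite_self,
            if_neg (by omega : ¬ (PySem.Int.mod k 2 = 1 ∧ PySem.Int.mod n 2 = 0))]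
        exact ih _ hlt _ _ rfl hk'
      · by_cases hnz : PySem.Int.mod n 2 = 0
        · rw [if_pos (by omega : PySem.Int.mod k 2 ≠ 0),
              if_neg (by omega : ¬ PySem.Int.mod n 2 ≠ 0),
              if_pos (by omega : PySem.Int.mod k 2 = 1 ∧ PySem.Int.mod n 2 = 0)]
          exact ih _ hlt _ _ rfl hk'
        · rw [if_pos (by omega : PySem.Int.mod k 2 ≠ 0),
              if_pos (by omega : PySem.Int.mod n 2 ≠ 0),
              if_neg (by omega : ¬ (PySem.Int.mod k 2 = 1 ∧ PySem.Int.mod n 2 = 0))]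
          exact ih _ hlt _ _ rfl hk' 

-- ===== VERDICT (by name: the statement is the Claim_ definition above) =====
theorem task3_spec : Claim_equal_task3 := by
  intro n k _ hk
  unfold Spec_task3
  exact task3_eq_alt k.toNat n k rfl hk
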